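-- pv_equiv track=rewrite | github.com/lcrojanouninorte/inndico_sources | scripts/inndico.py | split_text_into_parts
-- ===== SOURCE A (Python) =====
-- def split_text_into_parts(text, max_tokens_per_part):
--     parts = []
--     current_part = ""
--     tokens_count = 0
--     for token in text.split():
--         tokens_count += len(token.split())
--         if tokens_count <= max_tokens_per_part:
--             current_part += token + " "
--         else:
--             parts.append(current_part.strip())
--             current_part = token + " "
--             tokens_count = len(token.split())
--     if current_part:
--         parts.append(current_part.strip())
--     return parts
-- ===== SOURCE B (Python) =====
-- def split_text_into_parts(text, max_tokens_per_part):
--     tokens = text.split()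
--     return [" ".join(tokens[i:i + max_tokens_per_part])
--             for i in range(0, len(tokens), max_tokens_per_part)]
-- ===== Notes on version B (the rewrite author's own statement) =====
-- stated objective: simpler
-- what changed: Replaces the running accumulator/counter-and-flush loop with one text.split() followed by slicing the token list into consecutive groups of max_tokens_per_part indices apart, each joined with a single space.
-- intended difference: For max_tokens_per_part < 0 on a text containing at least one token, A returns a leading empty string followed by every token as its own part (the initially empty current part is flushed by leftover loop state), while B returns []: with a negative capacity no part can hold any token, so the empty list is the intended value. — e.g. on split_text_into_parts("a", -1): A returns ["", "a"], B returns []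
-- outside the precondition, e.g. on split_text_into_parts('a b', 0): A returns ['', 'a', 'b'], B raises ValueError
import Mathlib
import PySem

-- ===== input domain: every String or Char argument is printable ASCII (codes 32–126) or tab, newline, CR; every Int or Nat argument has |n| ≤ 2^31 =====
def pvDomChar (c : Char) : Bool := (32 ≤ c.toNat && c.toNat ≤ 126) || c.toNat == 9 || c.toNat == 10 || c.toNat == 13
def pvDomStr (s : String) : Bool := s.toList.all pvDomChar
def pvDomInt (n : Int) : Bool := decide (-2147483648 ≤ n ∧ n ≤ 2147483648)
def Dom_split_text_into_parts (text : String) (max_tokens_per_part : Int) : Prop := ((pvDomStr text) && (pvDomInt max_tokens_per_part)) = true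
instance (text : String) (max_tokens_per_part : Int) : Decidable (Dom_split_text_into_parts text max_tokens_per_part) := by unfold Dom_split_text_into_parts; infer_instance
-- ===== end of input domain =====

-- B replaces A's accumulator/counter-and-flush loop by slicing the token list into
-- index-based groups of max_tokens_per_part and joining each group (objective: simpler).


-- ===== PORT A =====
-- A's final 'if current_part: parts.append(current_part.strip())'
def pvFinish (st : List (List Char) × List Char × Int) : List (List Char) :=
  if st.2.1 ≠ [] then st.1 ++ [PySem.Chars.strip st.2.1] else st.1

-- the body of A's for-loop: state = (parts, current_part, tokens_count)
def pvStepA (m : Int) (st : List (List Char) × List Char × Int) (token : List Char) :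
    List (List Char) × List Char × Int :=
  let cnt := st.2.2 + ((PySem.Chars.split₀ token).length : Int)
  if cnt ≤ m then (st.1, st.2.1 ++ (token ++ [' ']), cnt)
  else (st.1 ++ [PySem.Chars.strip st.2.1], token ++ [' '], ((PySem.Chars.split₀ token).length : Int))

def split_text_into_parts (text : String) (max_tokens_per_part : Int) : List String :=
  (pvFinish ((PySem.Chars.split₀ text.toList).foldl (pvStepA max_tokens_per_part) ([], [], 0))).map
    String.ofList

-- ===== PORT B =====
def split_text_into_parts_alt (text : String) (max_tokens_per_part : Int) : List String :=
  let tokens := PySem.Chars.split₀ text.toList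
  (PySem.List.pyRange 0 (tokens.length : Int) max_tokens_per_part).map
    (fun i => String.ofList (PySem.Chars.join [' ']
      (PySem.List.slice tokens (some i) (some (i + max_tokens_per_part)))))

-- ===== PRECONDITION & SPEC =====
-- Pre_ excludes only max_tokens_per_part = 0: there B's range(0, len(tokens), 0) raises ValueError
-- (while A returns a value by the same leftover-state accident described at D_ below).
def Pre_split_text_into_parts (text : String) (max_tokens_per_part : Int) : Prop :=
  max_tokens_per_part ≠ 0
instance (text : String) (max_tokens_per_part : Int) : Decidable (Pre_split_text_into_parts text max_tokens_per_part) := by unfold Pre_split_text_into_parts; infer_instance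
def pvWitness_split_text_into_parts : String × Int := ("a b c", 2)

-- For max_tokens_per_part < 0 on a text containing at least one token, A returns a leading empty
-- string followed by every token as its own part (the initially empty current part is flushed by
-- leftover loop state), while B returns []: with a negative capacity no part can hold any token,
-- so the empty list is the intended value.
def D_split_text_into_parts (text : String) (max_tokens_per_part : Int) : Prop :=
  max_tokens_per_part < 0 ∧ PySem.Str.split₀ text ≠ []
instance (text : String) (max_tokens_per_part : Int) : Decidable (D_split_text_into_parts text max_tokens_per_part) := by unfold D_split_text_into_parts; infer_instance

def Spec_split_text_into_parts (text : String) (max_tokens_per_part : Int) (out : List String) : Prop := ¬ D_split_text_into_parts text max_tokens_per_part → out = split_text_into_parts_alt text max_tokens_per_part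
instance (text : String) (max_tokens_per_part : Int) (out : List String) : Decidable (Spec_split_text_into_parts text max_tokens_per_part out) := by unfold Spec_split_text_into_parts; infer_instance

def pvDiffWitness_split_text_into_parts : String × Int := ("a", -1)
def pvDiffWitnessOut_split_text_into_parts : (List String) × (List String) := (["", "a"], [])

-- ===== CLAIM (what is proved, stated in full; the proofs are below) =====
def Claim_unchanged_split_text_into_parts : Prop := ∀ (text : String) (max_tokens_per_part : Int), Dom_split_text_into_parts text max_tokens_per_part → Pre_split_text_into_parts text max_tokens_per_part → Spec_split_text_into_parts text max_tokens_per_part (split_text_into_parts text max_tokens_per_part)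
def Claim_changed_split_text_into_parts : Prop := Dom_split_text_into_parts (pvDiffWitness_split_text_into_parts.1) (pvDiffWitness_split_text_into_parts.2) ∧ Pre_split_text_into_parts (pvDiffWitness_split_text_into_parts.1) (pvDiffWitness_split_text_into_parts.2) ∧ D_split_text_into_parts (pvDiffWitness_split_text_into_parts.1) (pvDiffWitness_split_text_into_parts.2) ∧ split_text_into_parts (pvDiffWitness_split_text_into_parts.1) (pvDiffWitness_split_text_into_parts.2) = pvDiffWitnessOut_split_text_into_parts.1 ∧ split_text_into_parts_alt (pvDiffWitness_split_text_into_parts.1) (pvDiffWitness_split_text_into_parts.2) = pvDiffWitnessOut_split_text_into_parts.2 ∧ pvDiffWitnessOut_split_text_into_parts.1 ≠ pvDiffWitnessOut_split_text_into_parts.2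
def Claim_exact_split_text_into_parts : Prop := ∀ (text : String) (max_tokens_per_part : Int), Dom_split_text_into_parts text max_tokens_per_part → Pre_split_text_into_parts text max_tokens_per_part → D_split_text_into_parts text max_tokens_per_part → split_text_into_parts text max_tokens_per_part ≠ split_text_into_parts_alt text max_tokens_per_part

-- ===== LEMMAS AND PROOFS =====

-- a word produced by str.split(): nonempty and whitespace-free
def pvW (t : List Char) : Prop := t ≠ [] ∧ ∀ c ∈ t, PySem.Chars.isspace c = false

-- the current_part A carries for the group g of tokens: each token followed by one space
def pvCur (g : List (List Char)) : List Char := (g.map (fun t => t ++ [' '])).flatten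

-- the joined consecutive groups of size k+1
def pvChunks (k : Nat) : List (List Char) → List (List Char)
  | [] => []
  | t :: ts => PySem.Chars.join [' '] (t :: ts.take k) :: pvChunks k (ts.drop k)
termination_by ts => ts.length
decreasing_by simp

theorem go_mem (s : List Char) : ∀ (cur : List Char) (acc : List (List Char)),
    (∀ t ∈ acc, pvW t) → (∀ c ∈ cur, PySem.Chars.isspace c = false) →
    ∀ t ∈ PySem.Chars.split₀.go s cur acc, pvW t := by
  induction s with
  | nil =>
    intro cur acc hacc hcur t ht
    unfold PySem.Chars.split₀.go at ht
    split at ht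
    · exact hacc t (List.mem_reverse.mp ht)
    · rename_i hne
      rw [List.mem_reverse, List.mem_cons] at ht
      rcases ht with h | h
      · subst h
        constructor
        · simp only [ne_eq, List.reverse_eq_nil_iff]
          intro hc; rw [hc] at hne; simp at hne
        · intro c hc; exact hcur c (List.mem_reverse.mp hc)
      · exact hacc t h
  | cons c rest ih =>
    intro cur acc hacc hcur t ht
    unfold PySem.Chars.split₀.go at ht
    split at ht
    · split at ht
      · exact ih [] acc hacc (by simp) t ht
      · rename_i hsp hne
        refine ih [] (cur.reverse :: acc) ?_ (by simp) t ht
        intro u hu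
        rw [List.mem_cons] at hu
        rcases hu with h | h
        · subst h
          constructor
          · simp only [ne_eq, List.reverse_eq_nil_iff]
            intro hc; rw [hc] at hne; simp at hne
          · intro d hd; exact hcur d (List.mem_reverse.mp hd)
        · exact hacc u h
    · rename_i hsp
      refine ih (c :: cur) acc hacc ?_ t ht
      intro d hd
      rw [List.mem_cons] at hd
      rcases hd with h | h
      · subst h; simpa using hsp
      · exact hcur d h

theorem tokens_W (s : List Char) : ∀ t ∈ PySem.Chars.split₀ s, pvW t :=
  go_mem s [] [] (by simp) (by simp)

theorem go_nospace (s : List Char) : ∀ (cur : List Char) (acc : List (List Char)),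
    (∀ c ∈ s, PySem.Chars.isspace c = false) →
    PySem.Chars.split₀.go s cur acc = PySem.Chars.split₀.go [] (s.reverse ++ cur) acc := by
  induction s with
  | nil => intro cur acc _; simp
  | cons c rest ih =>
    intro cur acc h
    have hc : PySem.Chars.isspace c = false := h c (List.mem_cons_self)
    conv_lhs => rw [PySem.Chars.split₀.go]
    simp only [hc, Bool.false_eq_true, if_false]
    rw [ih (c :: cur) acc (fun d hd => h d (List.mem_cons_of_mem _ hd))]
    simp

theorem split₀_self (t : List Char) (h : pvW t) : PySem.Chars.split₀ t = [t] := by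
  unfold PySem.Chars.split₀
  rw [go_nospace t [] [] h.2]
  simp [PySem.Chars.split₀.go, List.isEmpty_iff, h.1]

theorem pvCur_eq_join (g : List (List Char)) (hg : g ≠ []) :
    pvCur g = PySem.Chars.join [' '] g ++ [' '] := by
  induction g with
  | nil => simp at hg
  | cons t g' ih =>
    cases g' with
    | nil => simp [pvCur, PySem.Chars.join_singleton]
    | cons u g'' =>
      rw [PySem.Chars.join_cons_cons]
      have := ih (by simp)
      simp only [pvCur, List.map_cons, List.flatten_cons] at this ⊢
      rw [this]
      simp

theorem join_head (g : List (List Char)) (hg : g ≠ []) (hw : ∀ t ∈ g, pvW t) :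
    ∃ c rest, PySem.Chars.join [' '] g = c :: rest ∧ PySem.Chars.isspace c = false := by
  cases g with
  | nil => simp at hg
  | cons t g' =>
    obtain ⟨ht, hsp⟩ := hw t List.mem_cons_self
    cases t with
    | nil => simp at ht
    | cons c t' =>
      cases g' with
      | nil =>
        exact ⟨c, t', by rw [PySem.Chars.join_singleton], hsp c List.mem_cons_self⟩
      | cons u g'' =>
        exact ⟨c, t' ++ [' '] ++ PySem.Chars.join [' '] (u :: g''),
          by rw [PySem.Chars.join_cons_cons]; simp, hsp c List.mem_cons_self⟩

theorem join_last (g : List (List Char)) (hg : g ≠ []) (hw : ∀ t ∈ g, pvW t) :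
    ∃ rest c, PySem.Chars.join [' '] g = rest ++ [c] ∧ PySem.Chars.isspace c = false := by
  induction g with
  | nil => simp at hg
  | cons t g' ih =>
    cases g' with
    | nil =>
      obtain ⟨ht, hsp⟩ := hw t List.mem_cons_self
      refine ⟨t.dropLast, t.getLast ht, ?_, hsp _ (List.getLast_mem ht)⟩
      rw [PySem.Chars.join_singleton, List.dropLast_append_getLast ht]
    | cons u g'' =>
      obtain ⟨rest, c, hj, hc⟩ := ih (by simp) (fun v hv => hw v (List.mem_cons_of_mem _ hv))
      exact ⟨t ++ [' '] ++ rest, c, by rw [PySem.Chars.join_cons_cons, hj]; simp, hc⟩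

theorem strip_cur (g : List (List Char)) (hg : g ≠ []) (hw : ∀ t ∈ g, pvW t) :
    PySem.Chars.strip (pvCur g) = PySem.Chars.join [' '] g := by
  rw [pvCur_eq_join g hg]
  obtain ⟨c, rest, hj, hc⟩ := join_head g hg hw
  obtain ⟨rest', d, hj', hd⟩ := join_last g hg hw
  rw [PySem.Chars.strip, PySem.Chars.lstrip]
  rw [hj, List.cons_append, List.dropWhile_cons, hc]
  simp only [Bool.false_eq_true, if_false]
  rw [← List.cons_append, ← hj, PySem.Chars.rstrip]
  rw [List.reverse_append, List.reverse_singleton, List.singleton_append, List.dropWhile_cons]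
  have : PySem.Chars.isspace ' ' = true := by decide
  rw [this, if_pos rfl]
  rw [hj', List.reverse_append, List.reverse_singleton, List.singleton_append, List.dropWhile_cons, hd]
  simp [← hj']

theorem chunks_full (k : Nat) (g : List (List Char)) (hg : g ≠ []) (hlen : g.length ≤ k + 1) :
    pvChunks k g = [PySem.Chars.join [' '] g] := by
  cases g with
  | nil => simp at hg
  | cons t g' =>
    rw [pvChunks]
    have h1 : g'.length ≤ k := by simpa using hlen
    rw [List.take_of_length_le h1, List.drop_of_length_le h1, pvChunks]

theorem chunks_flush (k : Nat) (g ts : List (List Char)) (hlen : g.length = k + 1) :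
    pvChunks k (g ++ ts) = PySem.Chars.join [' '] g :: pvChunks k ts := by
  cases g with
  | nil => simp at hlen
  | cons t g' =>
    have h1 : g'.length = k := by simpa using hlen
    rw [List.cons_append, pvChunks]
    rw [List.take_append_of_le_length (by omega), List.take_of_length_le (by omega)]
    rw [List.drop_append_of_le_length (by omega), List.drop_of_length_le (by omega)]
    simp

theorem pyRange_pos_nil (a b s : Int) (hs : 0 < s) (hab : b ≤ a) :
    PySem.List.pyRange a b s = [] := by
  rw [PySem.List.pyRange_of_pos a b hs, if_neg (by omega)]
  simp

theorem pyRange_neg_nil (n s : Int) (hs : s < 0) (hn : 0 ≤ n) :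
    PySem.List.pyRange 0 n s = [] := by
  simp only [PySem.List.pyRange]
  rw [if_neg (by omega)]
  simp only [if_neg (by omega : ¬ (0:Int) < s), if_neg (by omega : ¬ n < 0)]
  simp

theorem pyRange_pos_cons (a b s : Int) (hs : 0 < s) (hab : a < b) :
    PySem.List.pyRange a b s = a :: PySem.List.pyRange (a + s) b s := by
  rw [PySem.List.pyRange_of_pos a b hs, PySem.List.pyRange_of_pos (a+s) b hs]
  rw [if_pos hab]
  have h1 : (1:Int) ≤ (b - a + s - 1) / s := by
    rw [Int.le_ediv_iff_mul_le hs]; omega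
  have key : (if a + s < b then ((b - (a+s) + s - 1) / s).toNat else 0)
      = ((b - a + s - 1)/s).toNat - 1 := by
    by_cases hab2 : a + s < b
    · rw [if_pos hab2]
      have e1 : b - (a+s) + s - 1 = (b - a + s - 1) + (-1)*s := by ring
      rw [e1, Int.add_mul_ediv_right _ _ (by omega : s ≠ 0)]
      omega
    · rw [if_neg hab2]
      have h2 : (b - a + s - 1)/s < 2 := by
        have h4 := Int.ediv_le_ediv hs (show b - a + s - 1 ≤ 2*s - 1 by omega)
        have h3 : (2*s - 1)/s = 1 := by
          rw [show 2*s - 1 = (s-1) + s*1 by ring, Int.add_mul_ediv_left _ _ (by omega : s ≠ 0),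
            Int.ediv_eq_zero_of_lt (by omega) (by omega)]
          omega
        omega
      omega
  rw [key]
  have hn : ((b - a + s - 1) / s).toNat = ((b - a + s - 1) / s).toNat - 1 + 1 := by omega
  rw [hn, List.range_succ_eq_map]
  simp only [List.map_cons, List.map_map, Nat.add_sub_cancel]
  refine List.cons_eq_cons.mpr ⟨by simp, ?_⟩
  apply List.map_congr_left
  intro k _
  simp [Nat.succ_eq_add_one]
  ring

theorem A_loop (m : Int) (hm : 1 ≤ m) : ∀ (ts : List (List Char)) (parts g : List (List Char)),
    g ≠ [] → (g.length : Int) ≤ m → (∀ t ∈ g, pvW t) → (∀ t ∈ ts, pvW t) →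
    pvFinish (ts.foldl (pvStepA m) (parts, pvCur g, (g.length : Int)))
      = parts ++ pvChunks (m.toNat - 1) (g ++ ts) := by
  intro ts
  induction ts with
  | nil =>
    intro parts g hg hlen hWg _
    have hcur : pvCur g ≠ [] := by
      cases g with
      | nil => simp at hg
      | cons t g' => simp [pvCur]
    rw [List.foldl_nil, pvFinish, if_pos hcur]
    simp only []
    rw [strip_cur g hg hWg, List.append_nil,
      chunks_full (m.toNat - 1) g hg (by omega)]
  | cons t ts ih =>
    intro parts g hg hlen hWg hWts
    have hWt : pvW t := hWts t List.mem_cons_self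
    have hWts' : ∀ u ∈ ts, pvW u := fun u hu => hWts u (List.mem_cons_of_mem _ hu)
    rw [List.foldl_cons]
    simp only [pvStepA, split₀_self t hWt, List.length_cons, List.length_nil, Nat.cast_one, zero_add]
    split_ifs with hle
    · have e1 : pvCur g ++ (t ++ [' ']) = pvCur (g ++ [t]) := by simp [pvCur]
      have e2 : (g.length : Int) + 1 = (((g ++ [t]).length : Nat) : Int) := by
        simp
      rw [e1, e2, ih parts (g ++ [t]) (by simp) (by rw [← e2]; exact hle)
        (by intro u hu; rcases List.mem_append.mp hu with h | h
            · exact hWg u h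
            · rw [List.mem_singleton] at h; subst h; exact hWt) hWts']
      simp
    · have hlenq : g.length = m.toNat := by omega
      have e1 : t ++ [' '] = pvCur [t] := by simp [pvCur]
      have e2 : (1 : Int) = (([t].length : Nat) : Int) := by simp
      rw [e1, e2, ih (parts ++ [PySem.Chars.strip (pvCur g)]) [t] (by simp) (by simp; omega)
        (by intro u hu; rw [List.mem_singleton] at hu; subst hu; exact hWt) hWts']
      rw [strip_cur g hg hWg, List.append_assoc, List.singleton_append,
        List.singleton_append, chunks_flush (m.toNat - 1) g (t :: ts) (by omega)]

theorem B_aux (m : Int) (hm : 0 < m) (ts : List (List Char)) : ∀ (k : Nat),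
    (PySem.List.pyRange (k : Int) (ts.length : Int) m).map
        (fun i => PySem.Chars.join [' '] (PySem.List.slice ts (some i) (some (i + m))))
      = pvChunks (m.toNat - 1) (ts.drop k) := by
  suffices H : ∀ (d k : Nat), ts.length - k ≤ d →
      (PySem.List.pyRange (k : Int) (ts.length : Int) m).map
          (fun i => PySem.Chars.join [' '] (PySem.List.slice ts (some i) (some (i + m))))
        = pvChunks (m.toNat - 1) (ts.drop k) from fun k => H _ k le_rfl
  intro d
  induction d with
  | zero =>
    intro k hk
    have hk' : ts.length ≤ k := by omega
    rw [pyRange_pos_nil _ _ _ hm (by exact_mod_cast hk'), List.drop_of_length_le hk']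
    simp [pvChunks]
  | succ d ih =>
    intro k hk
    by_cases hlt : k < ts.length
    · rw [pyRange_pos_cons _ _ _ hm (by exact_mod_cast hlt)]
      simp only [List.map_cons]
      have hsl : PySem.List.slice ts (some (k : Int)) (some ((k : Int) + m))
          = (ts.drop k).take m.toNat := by
        rw [PySem.List.slice_toNat ts (by omega) (by omega)]
        congr 1
        omega
      obtain ⟨t, rest, hl⟩ : ∃ t rest, ts.drop k = t :: rest := by
        cases h : ts.drop k with
        | nil => exfalso; have := List.length_drop (l := ts) (i := k); rw [h] at this; simp at this; omega
        | cons t rest => exact ⟨t, rest, rfl⟩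
      have hrest : rest = ts.drop (k + 1) := by
        have : (ts.drop k).drop 1 = ts.drop (k + 1) := by rw [List.drop_drop]
        rw [hl] at this; simpa using this
      have hm1 : m.toNat = m.toNat - 1 + 1 := by omega
      rw [hsl, hl, hm1, List.take_succ_cons, pvChunks]
      have e3 : (k : Int) + m = ((k + m.toNat : Nat) : Int) := by push_cast; omega
      rw [e3, ih (k + m.toNat) (by omega)]
      have e4 : ts.drop (k + m.toNat) = rest.drop (m.toNat - 1) := by
        rw [hrest, List.drop_drop]
        congr 1
        omega
      rw [e4]
      simp
    · have hk' : ts.length ≤ k := by omega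
      rw [pyRange_pos_nil _ _ _ hm (by exact_mod_cast hk'), List.drop_of_length_le hk']
      simp [pvChunks]

theorem stepA_cur_ne (m : Int) (st : List (List Char) × List Char × Int) (t : List Char) :
    (pvStepA m st t).2.1 ≠ [] := by
  simp only [pvStepA]
  split <;> simp

theorem foldl_cur_ne (m : Int) (ts : List (List Char)) : ∀ st,
    st.2.1 ≠ [] → (ts.foldl (pvStepA m) st).2.1 ≠ [] := by
  induction ts with
  | nil => intro st h; simpa using h
  | cons t ts ih =>
    intro st _
    rw [List.foldl_cons]
    exact ih _ (stepA_cur_ne m st t)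

theorem str_split₀_nil_iff (text : String) :
    PySem.Str.split₀ text = [] ↔ PySem.Chars.split₀ text.toList = [] := by
  constructor
  · intro h
    have := congrArg (List.map String.toList) h
    rw [PySem.Str.split₀_map_toList] at this
    simpa using this
  · intro h
    have : PySem.Str.split₀ text = List.map String.ofList (PySem.Chars.split₀ text.toList) := rfl
    rw [this, h]
    simp

-- ===== VERDICT (by name: the statement is the Claim_ definition above) =====
theorem split_text_into_parts_spec : Claim_unchanged_split_text_into_parts := by
  intro text m _ hpre
  unfold Spec_split_text_into_parts
  intro hnD
  unfold Pre_split_text_into_parts at hpre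
  unfold split_text_into_parts split_text_into_parts_alt
  simp only []
  have hW := tokens_W text.toList
  by_cases hm : 0 < m
  · cases htok : PySem.Chars.split₀ text.toList with
    | nil =>
      rw [List.foldl_nil, pvFinish, if_neg (by simp)]
      simp only [List.length_nil, Nat.cast_zero]
      rw [pyRange_pos_nil 0 0 m hm le_rfl]
      simp
    | cons t ts =>
      rw [htok] at hW
      have hWt : pvW t := hW t List.mem_cons_self
      have hfirst : pvStepA m ([], [], 0) t = ([], pvCur [t], (([t].length : Nat) : Int)) := by
        simp only [pvStepA, split₀_self t hWt, List.length_cons, List.length_nil, Nat.cast_one,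
          zero_add]
        rw [if_pos (show (1 : Int) ≤ m by omega)]
        simp [pvCur]
      rw [List.foldl_cons, hfirst,
        A_loop m (by omega) ts [] [t] (by simp) (by simp; omega)
          (by intro u hu; rw [List.mem_singleton] at hu; subst hu; exact hWt)
          (fun u hu => hW u (List.mem_cons_of_mem _ hu))]
      have hB := B_aux m hm (t :: ts) 0
      rw [List.drop_zero] at hB
      rw [show ((0 : Nat) : Int) = 0 from rfl] at hB
      simp only [List.nil_append, List.singleton_append]
      rw [← hB, List.map_map]
      simp [Function.comp_def]
  · have hmneg : m < 0 := by omega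
    unfold D_split_text_into_parts at hnD
    have hnil : PySem.Chars.split₀ text.toList = [] :=
      (str_split₀_nil_iff text).mp (not_not.mp ((not_and.mp hnD) hmneg))
    rw [hnil, List.foldl_nil, pvFinish, if_neg (by simp)]
    simp only [List.length_nil, Nat.cast_zero]
    rw [pyRange_neg_nil 0 m hmneg le_rfl]
    simp

theorem split_text_into_parts_changed : Claim_changed_split_text_into_parts := by
  unfold Claim_changed_split_text_into_parts; decide

theorem split_text_into_parts_tight : Claim_exact_split_text_into_parts := by
  intro text m _ _ hD
  unfold D_split_text_into_parts at hD
  obtain ⟨hm, hne⟩ := hD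
  have hBnil : split_text_into_parts_alt text m = [] := by
    unfold split_text_into_parts_alt
    simp only []
    rw [pyRange_neg_nil _ m hm (by positivity)]
    simp
  rw [hBnil]
  unfold split_text_into_parts
  cases htok : PySem.Chars.split₀ text.toList with
  | nil => exact absurd ((str_split₀_nil_iff text).mpr htok) hne
  | cons t ts =>
    rw [List.foldl_cons]
    have hcur := foldl_cur_ne m ts (pvStepA m ([], [], 0) t) (stepA_cur_ne m ([], [], 0) t)
    rw [pvFinish, if_pos hcur]
    simp
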